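-- pv_equiv track=rewrite | github.com/Noutsos/Phantom_bet | preprocess/collect_pipeline_copy.py | _merge_statistical_data
-- ===== SOURCE A (Python) =====
-- from typing import Dict, List, Optional, Union, Set
--
-- def _merge_statistical_data(existing: List[Dict], new: List[Dict]) -> List[Dict]:
--     """Merge statistical data"""
--     # This is a simple implementation - you might want more sophisticated merging
--     existing_ids = {item.get('fixture', {}).get('id') for item in existing if 'fixture' in item}
--
--     merged = existing.copy()
--     for new_item in new:
--         fixture_id = new_item.get('fixture', {}).get('id')
--         if fixture_id and fixture_id in existing_ids:
--             # Replace existing data for this fixture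
--             merged = [item for item in merged
--                      if item.get('fixture', {}).get('id') != fixture_id]
--         merged.append(new_item)
--
--     return merged
-- ===== SOURCE B (Python) =====
-- def _merge_statistical_data(existing, new):
--     """Merge statistical data (single right-to-left pass instead of per-collision list rebuilds)."""
--     def fid_of(item):
--         return item.get('fixture', {}).get('id')
--
--     existing_ids = {fid_of(item) for item in existing if 'fixture' in item}
--
--     # Walk `new` back-to-front: keep an item unless a later item carries the same
--     # replacing fixture id; collect the set of replacing ids on the way.
--     tail = []
--     seen = set()
--     for item in reversed(new):
--         fid = fid_of(item)
--         if fid not in seen: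
--             tail.append(item)
--         if fid and fid in existing_ids:
--             seen.add(fid)
--     tail.reverse()
--
--     head = [item for item in existing if fid_of(item) not in seen]
--     return head + tail
-- ===== Notes on version B (the rewrite author's own statement) =====
-- stated objective: alternative
-- what changed: Instead of rebuilding the whole merged list with a filtering pass for every colliding new item, B makes one right-to-left pass over `new` collecting the set of replacing fixture ids and the surviving new items, then filters `existing` once and concatenates; it trades A's per-collision list rebuilds for a single reversed pass with a seen-set.
import Mathlib
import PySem

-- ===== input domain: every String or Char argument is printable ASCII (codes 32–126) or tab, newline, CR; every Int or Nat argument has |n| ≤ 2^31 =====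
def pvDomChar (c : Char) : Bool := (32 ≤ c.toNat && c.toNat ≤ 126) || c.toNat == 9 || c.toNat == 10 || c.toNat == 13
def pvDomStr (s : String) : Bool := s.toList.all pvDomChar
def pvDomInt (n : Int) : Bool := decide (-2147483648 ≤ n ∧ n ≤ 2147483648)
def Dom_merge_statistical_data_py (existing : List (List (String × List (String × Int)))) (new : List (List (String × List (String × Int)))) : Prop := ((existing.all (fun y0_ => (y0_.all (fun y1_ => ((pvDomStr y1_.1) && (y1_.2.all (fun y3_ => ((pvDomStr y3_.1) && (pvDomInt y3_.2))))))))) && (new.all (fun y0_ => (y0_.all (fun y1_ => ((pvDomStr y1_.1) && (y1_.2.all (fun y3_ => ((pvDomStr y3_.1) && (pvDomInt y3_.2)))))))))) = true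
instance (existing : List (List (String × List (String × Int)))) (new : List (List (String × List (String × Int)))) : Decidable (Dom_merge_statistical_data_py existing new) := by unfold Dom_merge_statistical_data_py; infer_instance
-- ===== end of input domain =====

-- B replaces A's per-collision rebuild of the merged list by one right-to-left pass
-- over `new` plus a single filter of `existing` (objective: alternative algorithm, same result).

-- ===== PORT A =====
-- item.get('fixture', {}).get('id')
def pvFid (item : List (String × List (String × Int))) : Option Int :=
  ((item.lookup "fixture").getD []).lookup "id"

-- Python truthiness of an Optional[int]: None and 0 are falsy
def pvTruthy (o : Option Int) : Bool :=
  match o with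
  | none => false
  | some v => v != 0

-- {item.get('fixture', {}).get('id') for item in existing if 'fixture' in item}
def pvExistingIds (existing : List (List (String × List (String × Int)))) : PySem.Set (Option Int) :=
  PySem.Set.ofList ((existing.filter (fun it => (it.lookup "fixture").isSome)).map pvFid)

def merge_statistical_data_py (existing : List (List (String × List (String × Int)))) (new : List (List (String × List (String × Int)))) : List (List (String × List (String × Int))) :=
  let existing_ids := pvExistingIds existing
  new.foldl (fun merged new_item =>
    let fixture_id := pvFid new_item
    let merged :=
      if pvTruthy fixture_id && decide (fixture_id ∈ existing_ids) then
        merged.filter (fun it => pvFid it != fixture_id)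
      else merged
    merged ++ [new_item]) existing

-- ===== PORT B =====
def merge_statistical_data_py_alt (existing : List (List (String × List (String × Int)))) (new : List (List (String × List (String × Int)))) : List (List (String × List (String × Int))) :=
  let existing_ids := pvExistingIds existing
  -- for item in reversed(new): append unless fid already seen; record replacing ids
  let p := new.reverse.foldl
    (fun (acc : List (List (String × List (String × Int))) × PySem.Set (Option Int)) item =>
      let fid := pvFid item
      let tail := if fid ∈ acc.2 then acc.1 else acc.1 ++ [item]
      let seen := if pvTruthy fid && decide (fid ∈ existing_ids) then PySem.Set.add acc.2 fid else acc.2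
      (tail, seen))
    ([], PySem.Set.empty)
  let head := existing.filter (fun it => !decide (pvFid it ∈ p.2))
  head ++ p.1.reverse

-- ===== PRECONDITION & SPEC =====
def Spec_merge_statistical_data_py (existing : List (List (String × List (String × Int)))) (new : List (List (String × List (String × Int)))) (out : List (List (String × List (String × Int)))) : Prop := out = merge_statistical_data_py_alt existing new
instance (existing : List (List (String × List (String × Int)))) (new : List (List (String × List (String × Int)))) (out : List (List (String × List (String × Int)))) : Decidable (Spec_merge_statistical_data_py existing new out) := by unfold Spec_merge_statistical_data_py; infer_instance

-- ===== CLAIM (what is proved, stated in full; the proofs are below) =====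
def Claim_equal_merge_statistical_data_py : Prop := ∀ (existing : List (List (String × List (String × Int)))) (new : List (List (String × List (String × Int)))), Dom_merge_statistical_data_py existing new → Spec_merge_statistical_data_py existing new (merge_statistical_data_py existing new)

-- ===== LEMMAS AND PROOFS =====

-- does new item n replace (its id is truthy and occurs among existing ids)?
def pvTrig (E : PySem.Set (Option Int)) (n : List (String × List (String × Int))) : Bool :=
  pvTruthy (pvFid n) && decide (pvFid n ∈ E)

-- is g the id of some replacing item of ns?
def pvMemR (E : PySem.Set (Option Int)) (ns : List (List (String × List (String × Int)))) (g : Option Int) : Bool :=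
  ns.any (fun n => pvTrig E n && (pvFid n == g))

-- the new items that survive to the end (no later replacing item with the same id)
def pvSurv (E : PySem.Set (Option Int)) : List (List (String × List (String × Int))) → List (List (String × List (String × Int)))
  | [] => []
  | n :: ns => (if pvMemR E ns (pvFid n) then [] else [n]) ++ pvSurv E ns

theorem pvMemR_cons (E : PySem.Set (Option Int)) (n : List (String × List (String × Int))) (ns : List (List (String × List (String × Int)))) (g : Option Int) :
    pvMemR E (n :: ns) g = ((pvTrig E n && (pvFid n == g)) || pvMemR E ns g) := by
  simp [pvMemR]

-- characterisation of A's loop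
theorem pvA_char (E : PySem.Set (Option Int)) (ns : List (List (String × List (String × Int)))) (acc : List (List (String × List (String × Int)))) :
    ns.foldl (fun merged new_item =>
      let fixture_id := pvFid new_item
      let merged :=
        if pvTruthy fixture_id && decide (fixture_id ∈ E) then
          merged.filter (fun it => pvFid it != fixture_id)
        else merged
      merged ++ [new_item]) acc
    = acc.filter (fun x => !pvMemR E ns (pvFid x)) ++ pvSurv E ns := by
  induction ns generalizing acc with
  | nil => simp [pvSurv, pvMemR]
  | cons n ns ih =>
    simp only [List.foldl_cons]
    rw [ih]
    rw [List.filter_append]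
    have hsingle : [n].filter (fun x => !pvMemR E ns (pvFid x))
        = if pvMemR E ns (pvFid n) then [] else [n] := by
      by_cases h : pvMemR E ns (pvFid n) = true <;> simp [h]
    by_cases ht : pvTrig E n = true
    · have ht' : (pvTruthy (pvFid n) && decide (pvFid n ∈ E)) = true := ht
      simp only [ht', if_pos]
      rw [List.filter_filter]
      have hpred : ∀ x, ((!pvMemR E ns (pvFid x)) && (pvFid x != pvFid n))
          = !pvMemR E (n :: ns) (pvFid x) := by
        intro x
        rw [pvMemR_cons, ht]
        by_cases h : pvFid n = pvFid x
        · simp [h]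
        · simp [bne, beq_iff_eq, h, Ne.symm h, Bool.and_comm, BEq.comm]
      have : (acc.filter fun x => (!pvMemR E ns (pvFid x)) && (pvFid x != pvFid n))
          = acc.filter fun x => !pvMemR E (n :: ns) (pvFid x) := by
        apply List.filter_congr; intro x _; exact hpred x
      rw [this, hsingle, pvSurv]
      simp [List.append_assoc]
    · have htf : pvTrig E n = false := by
        rcases Bool.eq_false_or_eq_true (pvTrig E n) with h | h
        · exact absurd h ht
        · exact h
      have ht' : (pvTruthy (pvFid n) && decide (pvFid n ∈ E)) = false := htf
      simp only [ht', Bool.false_eq_true, if_neg, not_false_iff]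
      have : (acc.filter fun x => !pvMemR E ns (pvFid x))
          = acc.filter fun x => !pvMemR E (n :: ns) (pvFid x) := by
        apply List.filter_congr; intro x _
        rw [pvMemR_cons, htf]
        simp
      rw [this, hsingle, pvSurv]
      simp [List.append_assoc]

-- B's right-to-left loop, named for the proof
def pvBLoop (E : PySem.Set (Option Int)) (ns : List (List (String × List (String × Int)))) :
    List (List (String × List (String × Int))) × PySem.Set (Option Int) :=
  ns.reverse.foldl
    (fun acc item =>
      (if pvFid item ∈ acc.2 then acc.1 else acc.1 ++ [item],
       if pvTruthy (pvFid item) && decide (pvFid item ∈ E) then PySem.Set.add acc.2 (pvFid item) else acc.2))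
    ([], PySem.Set.empty)

theorem pvBLoop_cons (E : PySem.Set (Option Int)) (n : List (String × List (String × Int))) (ns : List (List (String × List (String × Int)))) :
    pvBLoop E (n :: ns)
      = (if pvFid n ∈ (pvBLoop E ns).2 then (pvBLoop E ns).1 else (pvBLoop E ns).1 ++ [n],
         if pvTruthy (pvFid n) && decide (pvFid n ∈ E) then PySem.Set.add (pvBLoop E ns).2 (pvFid n) else (pvBLoop E ns).2) := by
  unfold pvBLoop
  rw [List.reverse_cons, List.foldl_append]
  rfl

-- characterisation of B's right-to-left loop
theorem pvB_char (E : PySem.Set (Option Int)) (ns : List (List (String × List (String × Int)))) :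
    (pvBLoop E ns).1.reverse = pvSurv E ns
    ∧ ∀ g, (g ∈ (pvBLoop E ns).2 ↔ pvMemR E ns g = true) := by
  induction ns with
  | nil =>
    constructor
    · simp [pvBLoop, pvSurv]
    · intro g; simp [pvBLoop, PySem.Set.empty, pvMemR]
  | cons n ns ih =>
    obtain ⟨ih1, ih2⟩ := ih
    rw [pvBLoop_cons]
    constructor
    · by_cases hmem : pvFid n ∈ (pvBLoop E ns).2
      · have hR : pvMemR E ns (pvFid n) = true := (ih2 _).mp hmem
        simp only [if_pos hmem]
        rw [pvSurv, hR]
        simpa using ih1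
      · have hR : pvMemR E ns (pvFid n) = false := by
          rcases Bool.eq_false_or_eq_true (pvMemR E ns (pvFid n)) with h | h
          · exact absurd ((ih2 _).mpr h) hmem
          · exact h
        simp only [if_neg hmem]
        rw [pvSurv, hR]
        simp [ih1]
    · intro g
      by_cases ht : (pvTruthy (pvFid n) && decide (pvFid n ∈ E)) = true
      · simp only [if_pos ht]
        rw [PySem.Set.mem_add, pvMemR_cons]
        constructor
        · rintro (h | h)
          · simp [(ih2 g).mp h]
          · simp [pvTrig, ht, h]
        · intro h
          rcases Bool.or_eq_true_iff.mp h with h | h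
          · right
            have := Bool.and_eq_true_iff.mp h
            exact (eq_comm.mp (beq_iff_eq.mp this.2))
          · exact Or.inl ((ih2 g).mpr h)
      · simp only [if_neg ht]
        rw [pvMemR_cons]
        have htf : pvTrig E n = false := by
          simpa [pvTrig] using ht
        rw [htf]
        simp [ih2 g]

-- ===== VERDICT (by name: the statement is the Claim_ definition above) =====
theorem merge_statistical_data_py_spec : Claim_equal_merge_statistical_data_py := by
  intro existing new _
  unfold Spec_merge_statistical_data_py
  have hA : merge_statistical_data_py existing new
      = existing.filter (fun x => !pvMemR (pvExistingIds existing) new (pvFid x))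
        ++ pvSurv (pvExistingIds existing) new :=
    pvA_char (pvExistingIds existing) new existing
  have hB : merge_statistical_data_py_alt existing new
      = existing.filter (fun it => !decide (pvFid it ∈ (pvBLoop (pvExistingIds existing) new).2))
        ++ (pvBLoop (pvExistingIds existing) new).1.reverse := rfl
  obtain ⟨h1, h2⟩ := pvB_char (pvExistingIds existing) new
  rw [hA, hB, h1]
  congr 1
  apply List.filter_congr
  intro x _
  rcases Bool.eq_false_or_eq_true (pvMemR (pvExistingIds existing) new (pvFid x)) with h | h
  · rw [h]
    simp [(h2 _).mpr h]
  · have hx : pvFid x ∉ (pvBLoop (pvExistingIds existing) new).2 := by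
      intro hm
      rw [(h2 _).mp hm] at h
      exact absurd h (by simp)
    rw [h]
    simp [hx]
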